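-- pv_equiv track=rewrite | github.com/Amo-Zeng/clinicaflow-medgemma | clinicaflow/benchmarks/ablation.py | _reasoning_only_predict
-- ===== SOURCE A (Python) =====
-- def _diff_cats(diff: list[str]) -> set[str]:
--     cats: set[str] = set()
--     for item in diff or []:
--         t = str(item or "").strip().lower()
--         if not t:
--             continue
--         if any(k in t for k in ("coronary", "embol", "heart failure", "pneumonia", "asthma", "copd")):
--             cats.add("cardiopulmonary")
--         if any(k in t for k in ("stroke", "intracranial", "hypogly", "aphasia")):
--             cats.add("neurologic")
--     return cats
--
-- def _reasoning_only_predict(diff: list[str]) -> tuple[str, set[str]]: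
--     cats = _diff_cats(diff)
--     tier = "routine"
--     for item in diff or []:
--         t = str(item or "").strip().lower()
--         if "intracranial hemorrhage" in t:
--             tier = "critical"
--             break
--     if tier == "routine" and cats:
--         tier = "urgent"
--     return tier, cats
-- ===== SOURCE B (Python) =====
-- def _reasoning_only_predict(diff: list[str]) -> tuple[str, set[str]]:
--     cats: set[str] = set()
--     critical = False
--     for item in diff or []:
--         t = str(item or "").strip().lower()
--         if not t:
--             continue
--         if any(k in t for k in ("coronary", "embol", "heart failure", "pneumonia", "asthma", "copd")):
--             cats.add("cardiopulmonary")
--         if any(k in t for k in ("stroke", "intracranial", "hypogly", "aphasia")):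
--             cats.add("neurologic")
--         if "intracranial hemorrhage" in t:
--             critical = True
--     tier = "critical" if critical else ("urgent" if cats else "routine")
--     return tier, cats
-- ===== Notes on version B (the rewrite author's own statement) =====
-- stated objective: simpler
-- what changed: Replaced the two separate scans (helper building the category set, then a second break-on-first-hit loop deciding the tier) with a single pass that accumulates the category set and a critical flag together, picking the tier afterwards; the helper function disappears.
import Mathlib
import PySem

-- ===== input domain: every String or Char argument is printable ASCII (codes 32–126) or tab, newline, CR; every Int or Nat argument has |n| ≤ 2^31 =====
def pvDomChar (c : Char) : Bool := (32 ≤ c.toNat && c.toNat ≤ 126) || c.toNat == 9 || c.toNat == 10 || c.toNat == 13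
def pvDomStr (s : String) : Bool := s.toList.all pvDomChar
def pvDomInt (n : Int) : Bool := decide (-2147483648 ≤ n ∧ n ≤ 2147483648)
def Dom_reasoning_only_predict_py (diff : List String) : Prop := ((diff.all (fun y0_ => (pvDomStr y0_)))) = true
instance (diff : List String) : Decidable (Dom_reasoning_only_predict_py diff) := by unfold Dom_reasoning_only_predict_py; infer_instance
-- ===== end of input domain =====

-- B is a single-pass rewrite of A (one loop accumulating category set and critical flag); same O(n) cost, no helper.

-- ===== PORT A =====
def pvNorm (item : String) : String := PySem.Str.lower (PySem.Str.strip item)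

def pvCardioKeys : List String := ["coronary", "embol", "heart failure", "pneumonia", "asthma", "copd"]
def pvNeuroKeys : List String := ["stroke", "intracranial", "hypogly", "aphasia"]

-- helper _diff_cats: loop body
def aStep (cats : PySem.Set String) (item : String) : PySem.Set String :=
  let t := pvNorm item
  if t = "" then cats
  else
    let cats := if pvCardioKeys.any (fun k => PySem.Str.isIn k t) then PySem.Set.add cats "cardiopulmonary" else cats
    let cats := if pvNeuroKeys.any (fun k => PySem.Str.isIn k t) then PySem.Set.add cats "neurologic" else cats
    cats

def aDiffCats (diff : List String) : PySem.Set String := diff.foldl aStep PySem.Set.empty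

-- A's tier loop with break: first item containing the key wins
def aTierLoop : List String → String
  | [] => "routine"
  | item :: rest =>
    let t := pvNorm item
    if PySem.Str.isIn "intracranial hemorrhage" t then "critical" else aTierLoop rest

def reasoning_only_predict_py (diff : List String) : String × List String :=
  let cats := aDiffCats diff
  let tier := aTierLoop diff
  let tier := if tier = "routine" ∧ ¬ cats.isEmpty then "urgent" else tier
  (tier, cats)

-- ===== PORT B =====
def bStep (st : Bool × PySem.Set String) (item : String) : Bool × PySem.Set String :=
  let t := pvNorm item
  if t = "" then st
  else
    let cats := if pvCardioKeys.any (fun k => PySem.Str.isIn k t) then PySem.Set.add st.2 "cardiopulmonary" else st.2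
    let cats := if pvNeuroKeys.any (fun k => PySem.Str.isIn k t) then PySem.Set.add cats "neurologic" else cats
    let critical := if PySem.Str.isIn "intracranial hemorrhage" t then true else st.1
    (critical, cats)

def reasoning_only_predict_py_alt (diff : List String) : String × List String :=
  let st := diff.foldl bStep (false, PySem.Set.empty)
  let tier := if st.1 then "critical" else if ¬ st.2.isEmpty then "urgent" else "routine"
  (tier, st.2)

-- ===== PRECONDITION & SPEC =====
def Spec_reasoning_only_predict_py (diff : List String) (out : String × List String) : Prop := out = reasoning_only_predict_py_alt diff
instance (diff : List String) (out : String × List String) : Decidable (Spec_reasoning_only_predict_py diff out) := by unfold Spec_reasoning_only_predict_py; infer_instance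

-- ===== CLAIM (what is proved, stated in full; the proofs are below) =====
def Claim_equal_reasoning_only_predict_py : Prop := ∀ (diff : List String), Dom_reasoning_only_predict_py diff → Spec_reasoning_only_predict_py diff (reasoning_only_predict_py diff)

-- ===== LEMMAS AND PROOFS =====

def pvCrit (item : String) : Bool := PySem.Str.isIn "intracranial hemorrhage" (pvNorm item)

theorem bStep_eq (st : Bool × PySem.Set String) (item : String) :
    bStep st item = (st.1 || pvCrit item, aStep st.2 item) := by
  unfold bStep aStep
  by_cases h : pvNorm item = ""
  · have hc : pvCrit item = false := by unfold pvCrit; rw [h]; decide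
    rw [hc]
    simp [h]
  · have hc : PySem.Str.isIn "intracranial hemorrhage" (pvNorm item) = pvCrit item := rfl
    simp only [if_neg h, hc]
    cases hcv : pvCrit item <;> cases hb : st.1 <;> simp

theorem fold_pair (diff : List String) (b : Bool) (cats : PySem.Set String) :
    diff.foldl bStep (b, cats) = (b || diff.any pvCrit, diff.foldl aStep cats) := by
  induction diff generalizing b cats with
  | nil => simp
  | cons x xs ih =>
    simp only [List.foldl_cons, List.any_cons, bStep_eq]
    rw [ih]
    simp [Bool.or_assoc]

theorem aTierLoop_eq (diff : List String) :
    aTierLoop diff = if diff.any pvCrit then "critical" else "routine" := by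
  induction diff with
  | nil => simp [aTierLoop]
  | cons x xs ih =>
    cases h : pvCrit x with
    | false =>
      have hx := h
      unfold pvCrit at hx
      simp only [PySem.Str.isIn_eq] at hx
      have hx' : PySem.Chars.isIn ['i', 'n', 't', 'r', 'a', 'c', 'r', 'a', 'n', 'i', 'a', 'l', ' ', 'h', 'e', 'm', 'o', 'r', 'r', 'h', 'a', 'g', 'e'] (pvNorm x).toList = _ := hx
      simp [aTierLoop, hx', h, ih]
    | true =>
      have hx := h
      unfold pvCrit at hx
      simp only [PySem.Str.isIn_eq] at hx
      have hx' : PySem.Chars.isIn ['i', 'n', 't', 'r', 'a', 'c', 'r', 'a', 'n', 'i', 'a', 'l', ' ', 'h', 'e', 'm', 'o', 'r', 'r', 'h', 'a', 'g', 'e'] (pvNorm x).toList = _ := hx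
      simp [aTierLoop, hx', h]

-- ===== VERDICT (by name: the statement is the Claim_ definition above) =====
theorem reasoning_only_predict_py_spec : Claim_equal_reasoning_only_predict_py := by
  intro diff _
  show reasoning_only_predict_py diff = reasoning_only_predict_py_alt diff
  unfold reasoning_only_predict_py reasoning_only_predict_py_alt aDiffCats
  rw [fold_pair, aTierLoop_eq]
  by_cases h : diff.any pvCrit
  · simp [h]
  · simp [h]
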